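-- pv_equiv track=rewrite | github.com/ROLLONENT/rollonAR | app.py | _format_combined_first_names
-- ===== SOURCE A (Python) =====
-- def _format_combined_first_names(first_names):
--     """v37.3 combined first names format:
--        1:  'Luke'
--        2:  'Luke & Josie'
--        3:  'Luke, Josie & Emily'
--        4:  'Luke, Josie, Emily & Paul'
--        5+: 'Luke, Josie, Emily, Paul & <N-4> others'"""
--     names = [n.strip() for n in (first_names or []) if n and n.strip()]
--     if not names:
--         return ''
--     if len(names) == 1:
--         return names[0]
--     if len(names) == 2:
--         return f'{names[0]} & {names[1]}'
--     if len(names) == 3: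
--         return f'{names[0]}, {names[1]} & {names[2]}'
--     if len(names) == 4:
--         return f'{names[0]}, {names[1]}, {names[2]} & {names[3]}'
--     head = ', '.join(names[:4])
--     return f'{head} & {len(names) - 4} others'
-- ===== SOURCE B (Python) =====
-- def _format_combined_first_names(first_names):
--     # Single streaming pass with accumulators: no intermediate name list,
--     # no slicing/join; separators are decided as names arrive.
--     head = None   # all shown names except the most recent, already joined with ', '
--     last = None   # most recently shown name
--     extra = 0     # names beyond the first four shown
--     shown = 0
--     for raw in (first_names or []):
--         n = raw.strip() if raw else ''
--         if not n:
--             continue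
--         if shown < 4:
--             if last is not None:
--                 head = last if head is None else head + ', ' + last
--             last = n
--             shown += 1
--         else:
--             extra += 1
--     if last is None:
--         return ''
--     if extra:
--         head = last if head is None else head + ', ' + last
--         last = str(extra) + ' others'
--     return last if head is None else head + ' & ' + last
-- ===== Notes on version B (the rewrite author's own statement) =====
-- stated objective: alternative
-- what changed: Replaced A's build-the-cleaned-list-then-pick-one-of-five-length-branches formatting with a single streaming pass over the raw input that maintains accumulators (joined head, last shown name, overflow count) and decides each separator as names arrive, with no intermediate list, slicing or join.
import Mathlib
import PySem

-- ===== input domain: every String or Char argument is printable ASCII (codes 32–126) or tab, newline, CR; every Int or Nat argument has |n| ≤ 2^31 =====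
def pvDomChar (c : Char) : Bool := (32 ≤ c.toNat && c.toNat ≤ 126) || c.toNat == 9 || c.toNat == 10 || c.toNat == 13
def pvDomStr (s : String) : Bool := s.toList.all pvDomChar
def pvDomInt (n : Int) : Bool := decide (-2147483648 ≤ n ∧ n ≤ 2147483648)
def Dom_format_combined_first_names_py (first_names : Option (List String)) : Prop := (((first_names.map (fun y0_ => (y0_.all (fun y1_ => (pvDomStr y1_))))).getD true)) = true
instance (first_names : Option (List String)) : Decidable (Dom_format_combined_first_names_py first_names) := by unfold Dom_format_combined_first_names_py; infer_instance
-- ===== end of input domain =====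

-- B replaces A's build-list-then-pick-a-branch-by-length formatting with ONE streaming
-- pass over the raw input: accumulators (head, last, extra, shown) decide each separator
-- as names arrive, with no intermediate list, slicing or join; objective: alternative.

-- ===== PORT A =====
def format_combined_first_names_py (first_names : Option (List String)) : String :=
  let names := ((first_names.getD []).filter
      (fun n => n ≠ "" && PySem.Str.strip n ≠ "")).map PySem.Str.strip
  if names = [] then ""
  else if names.length = 1 then PySem.List.pyGetD names 0 ""
  else if names.length = 2 then
    PySem.List.pyGetD names 0 "" ++ " & " ++ PySem.List.pyGetD names 1 ""
  else if names.length = 3 then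
    PySem.List.pyGetD names 0 "" ++ ", " ++ PySem.List.pyGetD names 1 "" ++ " & " ++
      PySem.List.pyGetD names 2 ""
  else if names.length = 4 then
    PySem.List.pyGetD names 0 "" ++ ", " ++ PySem.List.pyGetD names 1 "" ++ ", " ++
      PySem.List.pyGetD names 2 "" ++ " & " ++ PySem.List.pyGetD names 3 ""
  else
    let head := PySem.Str.join ", " (PySem.List.slice names none (some 4))
    head ++ " & " ++ PySem.Int.toStr ((names.length : Int) - 4) ++ " others"

-- ===== PORT B =====
-- the loop body of Source B: state (head, last, extra, shown)
def pvStepB (st : Option String × Option String × Int × Int) (raw : String) :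
    Option String × Option String × Int × Int :=
  let n := if raw ≠ "" then PySem.Str.strip raw else ""
  if n = "" then st
  else if st.2.2.2 < 4 then
    match st.2.1 with
    | none => (st.1, some n, st.2.2.1, st.2.2.2 + 1)
    | some l => (some (match st.1 with | none => l | some h => h ++ ", " ++ l),
                 some n, st.2.2.1, st.2.2.2 + 1)
  else (st.1, st.2.1, st.2.2.1 + 1, st.2.2.2)

def format_combined_first_names_py_alt (first_names : Option (List String)) : String :=
  let st := (first_names.getD []).foldl pvStepB (none, none, (0 : Int), (0 : Int))
  match st.2.1 with
  | none => ""
  | some l =>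
    let hl : Option String × String :=
      if st.2.2.1 ≠ 0 then
        (some (match st.1 with | none => l | some h => h ++ ", " ++ l),
         PySem.Int.toStr st.2.2.1 ++ " others")
      else (st.1, l)
    match hl.1 with
    | none => hl.2
    | some h => h ++ " & " ++ hl.2

-- ===== PRECONDITION & SPEC =====
def Spec_format_combined_first_names_py (first_names : Option (List String)) (out : String) : Prop := out = format_combined_first_names_py_alt first_names
instance (first_names : Option (List String)) (out : String) : Decidable (Spec_format_combined_first_names_py first_names out) := by unfold Spec_format_combined_first_names_py; infer_instance

-- ===== CLAIM (what is proved, stated in full; the proofs are below) =====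
def Claim_equal_format_combined_first_names_py : Prop := ∀ (first_names : Option (List String)), Dom_format_combined_first_names_py first_names → Spec_format_combined_first_names_py first_names (format_combined_first_names_py first_names)

-- ===== LEMMAS AND PROOFS =====

-- the non-skipping step of B's loop, on an already-cleaned name
def pvStepC (st : Option String × Option String × Int × Int) (n : String) :
    Option String × Option String × Int × Int :=
  if st.2.2.2 < 4 then
    match st.2.1 with
    | none => (st.1, some n, st.2.2.1, st.2.2.2 + 1)
    | some l => (some (match st.1 with | none => l | some h => h ++ ", " ++ l),
                 some n, st.2.2.1, st.2.2.2 + 1)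
  else (st.1, st.2.1, st.2.2.1 + 1, st.2.2.2)

lemma stepB_eq (st : Option String × Option String × Int × Int) (r : String) :
    pvStepB st r =
      if (r ≠ "" && PySem.Str.strip r ≠ "") then pvStepC st (PySem.Str.strip r) else st := by
  by_cases h1 : r = ""
  · subst h1; rfl
  · by_cases h2 : PySem.Str.strip r = "" <;> simp [pvStepB, pvStepC, h1, h2]

-- B's fold over the raw list is pvStepC folded over the cleaned-name list
lemma foldB_clean (raw : List String) (st : Option String × Option String × Int × Int) :
    raw.foldl pvStepB st =
      ((raw.filter (fun n => n ≠ "" && PySem.Str.strip n ≠ "")).map PySem.Str.strip).foldl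
        pvStepC st := by
  induction raw generalizing st with
  | nil => rfl
  | cons r rs ih =>
      rw [List.foldl_cons, stepB_eq, List.filter_cons]
      by_cases hp : (r ≠ "" && PySem.Str.strip r ≠ "") = true
      · rw [if_pos hp, if_pos hp, List.map_cons, List.foldl_cons]
        exact ih _
      · rw [if_neg hp, if_neg hp]
        exact ih _

-- once four names are shown, every further name only increments 'extra'
lemma foldC_tail (rest : List String) (h l : Option String) (e : Int) :
    rest.foldl pvStepC (h, l, e, 4) = (h, l, e + (rest.length : Int), 4) := by
  induction rest generalizing e with
  | nil => simp
  | cons x xs ih =>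
      simp only [List.foldl_cons, pvStepC]
      norm_num
      rw [ih]
      simp only [Prod.mk.injEq]
      refine ⟨trivial, trivial, by ring, trivial⟩

-- Core fact: A's per-length formatting equals B's finalized fold over the same cleaned list
lemma core_eq (ns : List String) :
    (if ns = [] then ""
     else if ns.length = 1 then PySem.List.pyGetD ns 0 ""
     else if ns.length = 2 then
       PySem.List.pyGetD ns 0 "" ++ " & " ++ PySem.List.pyGetD ns 1 ""
     else if ns.length = 3 then
       PySem.List.pyGetD ns 0 "" ++ ", " ++ PySem.List.pyGetD ns 1 "" ++ " & " ++
         PySem.List.pyGetD ns 2 ""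
     else if ns.length = 4 then
       PySem.List.pyGetD ns 0 "" ++ ", " ++ PySem.List.pyGetD ns 1 "" ++ ", " ++
         PySem.List.pyGetD ns 2 "" ++ " & " ++ PySem.List.pyGetD ns 3 ""
     else
       PySem.Str.join ", " (PySem.List.slice ns none (some 4)) ++ " & " ++
         PySem.Int.toStr ((ns.length : Int) - 4) ++ " others") =
    (let st := ns.foldl pvStepC (none, none, (0 : Int), (0 : Int))
     match st.2.1 with
     | none => ""
     | some l =>
       let hl : Option String × String :=
         if st.2.2.1 ≠ 0 then
           (some (match st.1 with | none => l | some h => h ++ ", " ++ l),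
            PySem.Int.toStr st.2.2.1 ++ " others")
         else (st.1, l)
       match hl.1 with
       | none => hl.2
       | some h => h ++ " & " ++ hl.2) := by
  match ns with
  | [] => rfl
  | [a] => rfl
  | [a, b] =>
      simp [pvStepC, PySem.List.pyGetD, PySem.List.pyIdx?, PySem.List.pyGet?]
  | [a, b, c] =>
      simp [pvStepC, PySem.List.pyGetD, PySem.List.pyIdx?, PySem.List.pyGet?]
  | [a, b, c, d] =>
      simp [pvStepC, PySem.List.pyGetD, PySem.List.pyIdx?, PySem.List.pyGet?]
  | a :: b :: c :: d :: e :: rest =>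
      have h5 : List.foldl pvStepC (none, none, (0 : Int), (0 : Int))
            (a :: b :: c :: d :: e :: rest) =
          rest.foldl pvStepC
            (some (a ++ ", " ++ b ++ ", " ++ c), some d, (1 : Int), 4) := rfl
      have hne : (1 : Int) + (rest.length : Int) ≠ 0 := by positivity
      have hlen : ((a :: b :: c :: d :: e :: rest).length : Int) - 4 =
          1 + (rest.length : Int) := by simp; ring
      simp only [h5, foldC_tail, hlen]
      simp [hne, PySem.Str.join, PySem.Chars.join, PySem.List.slice, PySem.List.clampIdx]
      apply String.toList_injective
      simp [List.intercalate]

-- ===== VERDICT (by name: the statement is the Claim_ definition above) =====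
theorem format_combined_first_names_py_spec : Claim_equal_format_combined_first_names_py := by
  intro first_names _
  unfold Spec_format_combined_first_names_py
  unfold format_combined_first_names_py format_combined_first_names_py_alt
  rw [foldB_clean]
  exact core_eq _
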